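-- pv_equiv track=rewrite | github.com/applepc24/jungleAlg | 상금_헌터.py | p2017
-- ===== SOURCE A (Python) =====
-- def p2017(a):
--     if a == 0:
--         return 0
--     bound = [1, 3, 6, 10 ,15, 21]
--     money = [500, 300, 200, 50, 30 ,10]
--
--     for i in range(len(bound)):
--         if a <= bound[i]:
--             return money[i]
--     return 0
-- ===== SOURCE B (Python) =====
-- def p2017(a):
--     if a == 0:
--         return 0
--     bound = [1, 3, 6, 10, 15, 21]
--     money = [500, 300, 200, 50, 30, 10]
--     lo, hi = 0, len(bound)
--     while lo < hi:
--         mid = (lo + hi) // 2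
--         if bound[mid] < a:
--             lo = mid + 1
--         else:
--             hi = mid
--     return money[lo] if lo < len(money) else 0
-- ===== Notes on version B (the rewrite author's own statement) =====
-- stated objective: alternative
-- what changed: Replaces the linear scan over the bucket boundaries with a hand-written lower-bound binary search (bisect_left) over the sorted bound list; the early zero guard is kept.
import Mathlib
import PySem

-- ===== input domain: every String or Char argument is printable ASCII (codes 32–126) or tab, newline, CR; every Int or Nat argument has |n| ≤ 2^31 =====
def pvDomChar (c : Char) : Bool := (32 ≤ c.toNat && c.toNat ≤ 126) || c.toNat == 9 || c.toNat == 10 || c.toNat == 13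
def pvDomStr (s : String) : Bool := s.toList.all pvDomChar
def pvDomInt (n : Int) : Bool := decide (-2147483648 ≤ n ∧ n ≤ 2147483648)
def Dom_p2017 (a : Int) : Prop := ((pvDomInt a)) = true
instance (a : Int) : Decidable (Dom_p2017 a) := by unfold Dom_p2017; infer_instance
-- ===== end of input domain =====

-- B replaces A's linear scan of the bucket boundaries with a lower-bound binary search over the same sorted bound list (alternative decomposition, not claimed faster).

-- ===== PORT A =====
-- A's for-loop over i in range(len(bound)): first i with a <= bound[i] yields money[i], else 0.
def p2017Go (a : Int) : List (Int × Int) → Int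
  | [] => 0
  | (b, m) :: rest => if a ≤ b then m else p2017Go a rest

def p2017 (a : Int) : Int :=
  if a == 0 then 0
  else
    let bound : List Int := [1, 3, 6, 10, 15, 21]
    let money : List Int := [500, 300, 200, 50, 30, 10]
    p2017Go a (bound.zip money)

-- ===== PORT B =====
-- B's while-loop: lower-bound binary search (bisect_left) on bound.
def p2017Bsearch (a : Int) (bound : List Int) (lo hi : Nat) : Nat :=
  if lo < hi then
    let mid := (lo + hi) / 2
    if bound.getD mid 0 < a then p2017Bsearch a bound (mid + 1) hi
    else p2017Bsearch a bound lo mid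
  else lo
termination_by hi - lo
decreasing_by all_goals omega

def p2017_alt (a : Int) : Int :=
  if a == 0 then 0
  else
    let bound : List Int := [1, 3, 6, 10, 15, 21]
    let money : List Int := [500, 300, 200, 50, 30, 10]
    let lo := p2017Bsearch a bound 0 bound.length
    if lo < money.length then money.getD lo 0 else 0

-- ===== PRECONDITION & SPEC =====
def Spec_p2017 (a : Int) (out : Int) : Prop := out = p2017_alt a
instance (a : Int) (out : Int) : Decidable (Spec_p2017 a out) := by unfold Spec_p2017; infer_instance

-- ===== CLAIM (what is proved, stated in full; the proofs are below) =====
def Claim_equal_p2017 : Prop := ∀ (a : Int), Dom_p2017 a → Spec_p2017 a (p2017 a)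

-- ===== LEMMAS AND PROOFS =====

-- ===== VERDICT (by name: the statement is the Claim_ definition above) =====
theorem p2017_spec : Claim_equal_p2017 := by
  intro a _
  unfold Spec_p2017 p2017 p2017_alt
  by_cases h0 : a = 0
  · simp [h0]
  · simp only [beq_iff_eq, h0, if_false]
    -- split the integers into the seven bucket regions; in each, both the scan
    -- and the binary search evaluate to concrete positions
    rcases le_or_gt a 1 with h | h
    · rw [show p2017Bsearch a [1,3,6,10,15,21] 0 ([(1:Int),3,6,10,15,21].length) = 0 from by
        simp [p2017Bsearch, show ¬((10:Int) < a) by omega, show ¬((3:Int) < a) by omega,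
          show ¬((1:Int) < a) by omega]]
      simp [p2017Go, h]
    rcases le_or_gt a 3 with h2 | h2
    · rw [show p2017Bsearch a [1,3,6,10,15,21] 0 ([(1:Int),3,6,10,15,21].length) = 1 from by
        simp [p2017Bsearch, show ¬((10:Int) < a) by omega, show ¬((3:Int) < a) by omega,
          show ((1:Int) < a) by omega]]
      simp [p2017Go, show ¬(a ≤ 1) by omega, h2]
    rcases le_or_gt a 6 with h3 | h3
    · rw [show p2017Bsearch a [1,3,6,10,15,21] 0 ([(1:Int),3,6,10,15,21].length) = 2 from by
        simp [p2017Bsearch, show ¬((10:Int) < a) by omega, show ((3:Int) < a) by omega,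
          show ¬((6:Int) < a) by omega]]
      simp [p2017Go, show ¬(a ≤ 1) by omega, show ¬(a ≤ 3) by omega, h3]
    rcases le_or_gt a 10 with h4 | h4
    · rw [show p2017Bsearch a [1,3,6,10,15,21] 0 ([(1:Int),3,6,10,15,21].length) = 3 from by
        simp [p2017Bsearch, show ¬((10:Int) < a) by omega, show ((3:Int) < a) by omega,
          show ((6:Int) < a) by omega]]
      simp [p2017Go, show ¬(a ≤ 1) by omega, show ¬(a ≤ 3) by omega,
        show ¬(a ≤ 6) by omega, h4]
    rcases le_or_gt a 15 with h5 | h5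
    · rw [show p2017Bsearch a [1,3,6,10,15,21] 0 ([(1:Int),3,6,10,15,21].length) = 4 from by
        simp [p2017Bsearch, show ((10:Int) < a) by omega, show ¬((21:Int) < a) by omega,
          show ¬((15:Int) < a) by omega]]
      simp [p2017Go, show ¬(a ≤ 1) by omega, show ¬(a ≤ 3) by omega,
        show ¬(a ≤ 6) by omega, show ¬(a ≤ 10) by omega, h5]
    rcases le_or_gt a 21 with h6 | h6
    · rw [show p2017Bsearch a [1,3,6,10,15,21] 0 ([(1:Int),3,6,10,15,21].length) = 5 from by
        simp [p2017Bsearch, show ((10:Int) < a) by omega, show ¬((21:Int) < a) by omega,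
          show ((15:Int) < a) by omega]]
      simp [p2017Go, show ¬(a ≤ 1) by omega, show ¬(a ≤ 3) by omega,
        show ¬(a ≤ 6) by omega, show ¬(a ≤ 10) by omega, show ¬(a ≤ 15) by omega, h6]
    · rw [show p2017Bsearch a [1,3,6,10,15,21] 0 ([(1:Int),3,6,10,15,21].length) = 6 from by
        simp [p2017Bsearch, show ((10:Int) < a) by omega, show ((21:Int) < a) by omega]]
      simp [p2017Go, show ¬(a ≤ 1) by omega, show ¬(a ≤ 3) by omega,
        show ¬(a ≤ 6) by omega, show ¬(a ≤ 10) by omega, show ¬(a ≤ 15) by omega,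
        show ¬(a ≤ 21) by omega]
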